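-- pv_equiv track=rewrite | github.com/donghao2nanjing/easy_states | scripts/generate_initialization.py | generate_from_template
-- ===== SOURCE A (Python) =====
-- def generate_from_template(list_template_lines, inserted_lines, position_line):
--     index = -1
--     for idx, line in enumerate(list_template_lines):
--         # find the position to insert code
--         if position_line in line:
--             index = idx
--
--     if index == -1 :
--         return list_template_lines # do not insert anything
--
--     return list_template_lines[:index+1] + inserted_lines + list_template_lines[index+1:]
-- ===== SOURCE B (Python) =====
-- def generate_from_template(list_template_lines, inserted_lines, position_line):
--     # Single reverse pass building the output back-to-front with an accumulator:
--     # the first matching line seen (= last matching line of the template) triggers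
--     # the insertion; no index tracking, no slice concatenation.
--     out = []
--     matched = False
--     for line in reversed(list_template_lines):
--         if not matched and position_line in line:
--             out.extend(reversed(inserted_lines))
--             matched = True
--         out.append(line)
--     if not matched:
--         return list_template_lines
--     out.reverse()
--     return out
-- ===== Notes on version B (the rewrite author's own statement) =====
-- stated objective: alternative
-- what changed: B builds the output back-to-front in a single accumulator pass over reversed(lines), splicing the inserted lines at the first match seen (the last matching line), instead of A's index-tracking forward sweep followed by slice concatenation.
import Mathlib
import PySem

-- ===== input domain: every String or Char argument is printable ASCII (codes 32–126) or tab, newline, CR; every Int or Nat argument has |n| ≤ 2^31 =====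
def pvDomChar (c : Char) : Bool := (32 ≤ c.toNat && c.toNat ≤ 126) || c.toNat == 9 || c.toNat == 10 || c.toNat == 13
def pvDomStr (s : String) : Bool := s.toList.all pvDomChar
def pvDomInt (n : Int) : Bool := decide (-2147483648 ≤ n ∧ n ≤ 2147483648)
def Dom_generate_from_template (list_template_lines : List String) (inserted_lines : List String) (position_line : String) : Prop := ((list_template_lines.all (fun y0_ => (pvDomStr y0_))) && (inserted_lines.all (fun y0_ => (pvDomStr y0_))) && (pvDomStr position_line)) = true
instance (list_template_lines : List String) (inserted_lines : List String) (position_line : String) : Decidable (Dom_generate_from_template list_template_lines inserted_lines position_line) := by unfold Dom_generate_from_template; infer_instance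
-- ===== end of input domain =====

-- B builds the output back-to-front in one accumulator pass over the reversed lines,
-- splicing the insertion at the first match seen; same return value as A's index sweep + slices.


-- ===== PORT A =====
def generate_from_template (list_template_lines : List String) (inserted_lines : List String) (position_line : String) : List String :=
  let index : Int :=
    (PySem.List.enumerate list_template_lines 0).foldl
      (fun index p => if PySem.Str.isIn position_line p.2 then p.1 else index) (-1)
  if index == -1 then list_template_lines
  else PySem.List.slice list_template_lines none (some (index + 1))
        ++ inserted_lines
        ++ PySem.List.slice list_template_lines (some (index + 1)) none

-- ===== PORT B =====
-- one pass over reversed(lines): out.extend(reversed(inserted_lines)) at the first match, out.append(line) always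
def generate_from_template_alt (list_template_lines : List String) (inserted_lines : List String) (position_line : String) : List String :=
  let s :=
    list_template_lines.reverse.foldl
      (fun (s : List String × Bool) line =>
        let s := if !s.2 && PySem.Str.isIn position_line line
                 then (s.1 ++ inserted_lines.reverse, true) else s
        (s.1 ++ [line], s.2))
      ([], false)
  if !s.2 then list_template_lines else s.1.reverse

-- ===== PRECONDITION & SPEC =====
def Spec_generate_from_template (list_template_lines : List String) (inserted_lines : List String) (position_line : String) (out : List String) : Prop := out = generate_from_template_alt list_template_lines inserted_lines position_line
instance (list_template_lines : List String) (inserted_lines : List String) (position_line : String) (out : List String) : Decidable (Spec_generate_from_template list_template_lines inserted_lines position_line out) := by unfold Spec_generate_from_template; infer_instance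

-- ===== CLAIM =====
def Claim_equal_generate_from_template : Prop := ∀ (list_template_lines : List String) (inserted_lines : List String) (position_line : String), Dom_generate_from_template list_template_lines inserted_lines position_line → Spec_generate_from_template list_template_lines inserted_lines position_line (generate_from_template list_template_lines inserted_lines position_line)

-- ===== LEMMAS AND PROOFS =====

-- last index of a matching line, by structural recursion (proof-only reference)
def gftLast (pos : String) : List String → Option Nat
  | [] => none
  | a :: t =>
      match gftLast pos t with
      | some i => some (i + 1)
      | none => if PySem.Str.isIn pos a then some 0 else none

-- A's enumerate-foldl computes gftLast (shifted by the start offset)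
theorem foldA_eq (pos : String) (t : List String) : ∀ (n v : Int),
    (PySem.List.enumerate t n).foldl
      (fun idx p => if PySem.Str.isIn pos p.2 then p.1 else idx) v
    = (match gftLast pos t with
       | some i => n + (i : Int)
       | none => v) := by
  induction t with
  | nil => intro n v; simp [gftLast]
  | cons a t ih =>
      intro n v
      rw [PySem.List.enumerate_cons]
      simp only [List.foldl_cons]
      rw [ih]
      cases h : gftLast pos t with
      | some i =>
          simp [gftLast, h]
          ring
      | none =>
          simp only [gftLast, h]
          split_ifs with hm <;> simp

-- B's reverse-foldl state, characterized by gftLast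
theorem foldB_eq (pos : String) (ins : List String) (l : List String) :
    l.reverse.foldl
      (fun (s : List String × Bool) line =>
        let s := if !s.2 && PySem.Str.isIn pos line
                 then (s.1 ++ ins.reverse, true) else s
        (s.1 ++ [line], s.2))
      ([], false)
    = (match gftLast pos l with
       | some i => ((l.take (i + 1) ++ ins ++ l.drop (i + 1)).reverse, true)
       | none => (l.reverse, false)) := by
  induction l with
  | nil => simp [gftLast]
  | cons a t ih =>
      rw [List.reverse_cons, List.foldl_append, ih]
      cases h : gftLast pos t with
      | some i =>
          simp [gftLast, h, List.take_succ_cons, List.drop_succ_cons]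
      | none =>
          simp only [gftLast, h, List.foldl_cons, List.foldl_nil, Bool.not_false, Bool.true_and]
          by_cases hm : PySem.Chars.isIn pos.toList a.toList = true <;> simp [PySem.Str.isIn, hm]

-- ===== VERDICT =====
theorem generate_from_template_spec : Claim_equal_generate_from_template := by
  intro lines ins pos _
  unfold Spec_generate_from_template generate_from_template generate_from_template_alt
  rw [foldA_eq pos lines 0 (-1), foldB_eq pos ins lines]
  cases h : gftLast pos lines with
  | none => simp
  | some i =>
      have hne : ((0 : Int) + (i : Int) == -1) = false := by
        simp only [beq_eq_false_iff_ne, ne_eq]; omega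
      simp only [hne, Bool.false_eq_true, if_false, Bool.not_true, List.reverse_reverse]
      have h1 : (0 : Int) + (i : Int) + 1 = ((i + 1 : Nat) : Int) := by push_cast; ring
      rw [h1, PySem.List.slice_to_natCast, PySem.List.slice_from_natCast]
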